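-- pv_equiv track=rewrite | github.com/niklaslauffer/on-policy-expert-corrections | covariate_shift_analysis/compute_ic_metrics.py | _index_by_instance
-- ===== SOURCE A (Python) =====
-- from typing import Dict, List, Tuple, Optional
--
-- def _index_by_instance(emb_map: Dict[str, dict]) -> Dict[str, List[str]]:
--     idx: Dict[str, List[str]] = {}
--     for tid, rec in emb_map.items():
--         inst = rec.get('instance_id')
--         if inst is None:
--             continue
--         idx.setdefault(str(inst), []).append(tid)
--     return idx
-- ===== SOURCE B (Python) =====
-- def _index_by_instance(emb_map):
--     # Two-pass approach: extract (key, tid) pairs once, then group tids per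
--     # first-seen distinct key by scanning the pair list.
--     pairs = [(str(rec['instance_id']), tid)
--              for tid, rec in emb_map.items()
--              if rec.get('instance_id') is not None]
--     keys = list(dict.fromkeys(k for k, _ in pairs))
--     return {k: [t for kk, t in pairs if kk == k] for k in keys}
-- ===== Notes on version B (the rewrite author's own statement) =====
-- stated objective: alternative
-- what changed: B replaces A's single-pass incremental setdefault-grouping with a two-pass strategy: first extract the (instance_id, tid) pair list, then for each first-seen distinct key collect its tids by a scan of the pair list.
import Mathlib
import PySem

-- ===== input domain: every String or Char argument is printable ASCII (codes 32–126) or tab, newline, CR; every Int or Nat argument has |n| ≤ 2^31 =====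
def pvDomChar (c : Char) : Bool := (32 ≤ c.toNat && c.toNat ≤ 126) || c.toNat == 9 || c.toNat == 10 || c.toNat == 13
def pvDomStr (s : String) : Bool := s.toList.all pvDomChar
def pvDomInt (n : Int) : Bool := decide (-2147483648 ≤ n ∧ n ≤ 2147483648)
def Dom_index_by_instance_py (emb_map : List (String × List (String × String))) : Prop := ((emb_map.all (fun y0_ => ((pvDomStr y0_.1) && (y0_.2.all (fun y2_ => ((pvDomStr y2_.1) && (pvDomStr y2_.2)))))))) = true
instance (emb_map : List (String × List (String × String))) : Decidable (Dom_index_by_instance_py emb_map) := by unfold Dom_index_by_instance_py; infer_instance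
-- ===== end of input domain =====

-- B groups by a two-pass pair-list scan (extract pairs, then collect per distinct key) instead of A's incremental setdefault grouping; same result, alternative structure.


-- ===== PORT A =====
-- idx.setdefault(str(inst), []).append(tid) on the association-list dict: modify the
-- first entry with that key in place, else append a fresh (key, [tid]) entry at the end.
-- (str(inst) is the identity here: inst is already a str.)
def pvSda (d : List (String × List String)) (k t : String) : List (String × List String) :=
  match d with
  | [] => [(k, [t])]
  | (k', v) :: rest => if k' == k then (k', v ++ [t]) :: rest else (k', v) :: pvSda rest k t

def index_by_instance_py (emb_map : List (String × List (String × String))) : List (String × List String) :=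
  (PySem.Dict.ofList emb_map).items.foldl
    (fun idx p =>
      match (PySem.Dict.ofList p.2).get? "instance_id" with
      | none => idx
      | some inst => pvSda idx inst p.1)
    []

-- ===== PORT B =====
-- the pair-list comprehension: (str(rec['instance_id']), tid) for records that have an instance_id
def pvPairs (items : List (String × List (String × String))) : List (String × String) :=
  items.filterMap (fun p => ((PySem.Dict.ofList p.2).get? "instance_id").map (fun inst => (inst, p.1)))

-- [t for kk, t in pairs if kk == k]
def pvCollect (k : String) (pairs : List (String × String)) : List String :=
  pairs.filterMap (fun q => if q.1 == k then some q.2 else none)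

def index_by_instance_py_alt (emb_map : List (String × List (String × String))) : List (String × List String) :=
  let pairs := pvPairs (PySem.Dict.ofList emb_map).items
  (PySem.List.dedup (pairs.map Prod.fst)).map (fun k => (k, pvCollect k pairs))

-- ===== PRECONDITION & SPEC =====
def Spec_index_by_instance_py (emb_map : List (String × List (String × String))) (out : List (String × List String)) : Prop := out = index_by_instance_py_alt emb_map
instance (emb_map : List (String × List (String × String))) (out : List (String × List String)) : Decidable (Spec_index_by_instance_py emb_map out) := by unfold Spec_index_by_instance_py; infer_instance

-- ===== CLAIM (what is proved, stated in full; the proofs are below) =====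
def Claim_equal_index_by_instance_py : Prop := ∀ (emb_map : List (String × List (String × String))), Dom_index_by_instance_py emb_map → Spec_index_by_instance_py emb_map (index_by_instance_py emb_map)

-- ===== LEMMAS AND PROOFS =====

-- A's fold over the records is the setdefault-append fold over the extracted pair list.
theorem foldA_eq_fold_pairs (items : List (String × List (String × String)))
    (idx : List (String × List String)) :
    items.foldl
      (fun idx p =>
        match (PySem.Dict.ofList p.2).get? "instance_id" with
        | none => idx
        | some inst => pvSda idx inst p.1)
      idx
    = (pvPairs items).foldl (fun d q => pvSda d q.1 q.2) idx := by
  induction items generalizing idx with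
  | nil => rfl
  | cons p rest ih =>
    cases h : (PySem.Dict.ofList p.2).get? "instance_id" with
    | none => simp [pvPairs, h, ih]
    | some inst => simp [pvPairs, h, ih]

theorem collect_append (k : String) (ps : List (String × String)) (q : String × String) :
    pvCollect k (ps ++ [q]) = pvCollect k ps ++ (if q.1 == k then [q.2] else []) := by
  by_cases h : q.1 = k <;> simp [pvCollect, List.filterMap_append, h]

theorem collect_nil_of_not_mem (k : String) (ps : List (String × String))
    (h : k ∉ ps.map Prod.fst) : pvCollect k ps = [] := by
  rw [pvCollect, List.filterMap_eq_nil_iff]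
  intro q hq
  have hne : q.1 ≠ k := fun hh => h (hh ▸ List.mem_map_of_mem hq)
  simp [hne]

theorem sda_not_mem (ks : List String) (c : String → List String) (k t : String)
    (hk : k ∉ ks) :
    pvSda (ks.map fun k' => (k', c k')) k t = (ks.map fun k' => (k', c k')) ++ [(k, [t])] := by
  induction ks with
  | nil => rfl
  | cons a rest ih =>
    simp only [List.mem_cons, not_or] at hk
    have hne : a ≠ k := fun hh => hk.1 hh.symm
    simp [pvSda, hne, ih hk.2]

theorem sda_mem (ks : List String) (c : String → List String) (k t : String)
    (hnd : ks.Nodup) (hk : k ∈ ks) :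
    pvSda (ks.map fun k' => (k', c k')) k t
      = ks.map fun k' => (k', c k' ++ if k' == k then [t] else []) := by
  induction ks with
  | nil => cases hk
  | cons a rest ih =>
    rcases List.nodup_cons.mp hnd with ⟨ha, hndr⟩
    by_cases hak : a = k
    · subst hak
      simp [pvSda]
      exact fun x hx hxa => ha (hxa ▸ hx)
    · have hmem : k ∈ rest := by
        rcases List.mem_cons.mp hk with h | h
        · exact absurd h.symm hak
        · exact h
      simp [pvSda, hak, ih hndr hmem]

-- the grouping fold equals the dedup-then-collect construction
theorem fold_pairs_eq_group (ps : List (String × String)) :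
    ps.foldl (fun d q => pvSda d q.1 q.2) []
      = (PySem.List.dedup (ps.map Prod.fst)).map (fun k => (k, pvCollect k ps)) := by
  induction ps using List.reverseRecOn with
  | nil => rfl
  | append_singleton ps q ih =>
    rw [List.foldl_append, List.foldl_cons, List.foldl_nil, ih]
    have hdedup : PySem.List.dedup ((ps ++ [q]).map Prod.fst)
        = PySem.Set.add (PySem.List.dedup (ps.map Prod.fst)) q.1 := by
      simp [PySem.List.dedup_eq_ofList, PySem.Set.ofList, List.foldl_append]
    have hnd : (PySem.List.dedup (ps.map Prod.fst)).Nodup := by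
      rw [PySem.List.dedup_eq_ofList]; exact PySem.Set.nodup_ofList _
    by_cases hmem : q.1 ∈ ps.map Prod.fst
    · have hmemd : q.1 ∈ PySem.List.dedup (ps.map Prod.fst) := by
        rw [PySem.List.dedup_eq_ofList]; exact (PySem.Set.mem_ofList _ _).mpr hmem
      have hadd : PySem.Set.add (PySem.List.dedup (ps.map Prod.fst)) q.1
          = PySem.List.dedup (ps.map Prod.fst) := by
        simp [PySem.Set.add]
        obtain ⟨⟨a, b⟩, hb, ha⟩ := List.mem_map.mp hmem
        exact ⟨b, ha ▸ hb⟩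
      rw [hdedup, hadd, sda_mem _ _ _ _ hnd hmemd]
      apply List.map_congr_left
      intro k' _
      rw [collect_append]
      have : (q.1 == k') = (k' == q.1) := by
        by_cases h : q.1 = k'
        · subst h; rfl
        · simp [h, Ne.symm h]
      rw [this]
    · have hmemd : q.1 ∉ PySem.List.dedup (ps.map Prod.fst) := by
        rw [PySem.List.dedup_eq_ofList]
        exact fun h => hmem ((PySem.Set.mem_ofList _ _).mp h)
      have hadd : PySem.Set.add (PySem.List.dedup (ps.map Prod.fst)) q.1
          = PySem.List.dedup (ps.map Prod.fst) ++ [q.1] := by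
        simp [PySem.Set.add]
        exact fun x hx => hmem (List.mem_map.mpr ⟨(q.1, x), hx, rfl⟩)
      rw [hdedup, hadd, sda_not_mem _ _ _ _ hmemd, List.map_append]
      congr 1
      · apply List.map_congr_left
        intro k' hk'
        rw [collect_append]
        have hne : q.1 ≠ k' := fun hh => hmemd (hh ▸ hk')
        simp [hne]
      · simp [collect_append, collect_nil_of_not_mem _ _ hmem]


-- ===== VERDICT (by name: the statement is the Claim_ definition above) =====
theorem index_by_instance_py_spec : Claim_equal_index_by_instance_py := by
  intro emb_map _
  unfold Spec_index_by_instance_py index_by_instance_py index_by_instance_py_alt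
  rw [foldA_eq_fold_pairs, fold_pairs_eq_group]
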